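-- pv_equiv track=rewrite | github.com/ronie219/Practice | CodeChef/Chef and Recipe.py | recipe
-- ===== SOURCE A (Python) =====
-- from collections import Counter
--
-- def recipe(indigredent):
--     for i in range(len(indigredent)):
--         bol = True
--         for j in range(i, len(indigredent)):
--             if indigredent[i] == indigredent[j] and bol is True:
--                 continue
--             elif bol is False and indigredent[i] == indigredent[j]:
--                 return "NO"
--             else:
--                 bol = False
--     cnt = Counter(indigredent)
--     lst_cnt = [i[1] for i in cnt.items()]
--     if len(lst_cnt) != len(set(lst_cnt)):
--         return "NO"
--     return "YES"
-- ===== SOURCE B (Python) =====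
-- def recipe(indigredent):
--     seen = set()
--     lengths = set()
--     i = 0
--     n = len(indigredent)
--     while i < n:
--         x = indigredent[i]
--         if x in seen:
--             return "NO"
--         j = i + 1
--         while j < n and indigredent[j] == x:
--             j += 1
--         run = j - i
--         if run in lengths:
--             return "NO"
--         seen.add(x)
--         lengths.add(run)
--         i = j
--     return "YES"
-- ===== Notes on version B (the rewrite author's own statement) =====
-- stated objective: faster
-- what changed: A scans every suffix of the list for a reappearing pivot (quadratic) and then builds a Counter to compare frequency counts; B makes a single left-to-right pass over maximal runs of equal elements, rejecting as soon as a run value or a run length repeats, using two sets.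
import Mathlib
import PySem

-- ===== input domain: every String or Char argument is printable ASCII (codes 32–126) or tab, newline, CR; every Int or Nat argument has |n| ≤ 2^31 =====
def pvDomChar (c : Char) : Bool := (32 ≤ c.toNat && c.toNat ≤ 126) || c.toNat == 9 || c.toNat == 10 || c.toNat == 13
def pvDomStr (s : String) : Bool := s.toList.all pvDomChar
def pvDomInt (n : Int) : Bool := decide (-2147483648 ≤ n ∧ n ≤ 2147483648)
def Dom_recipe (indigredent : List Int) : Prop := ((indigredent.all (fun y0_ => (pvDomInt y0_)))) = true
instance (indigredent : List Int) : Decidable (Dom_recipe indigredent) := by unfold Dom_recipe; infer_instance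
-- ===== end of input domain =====

-- B replaces A's quadratic suffix-scan plus Counter with a single left-to-right pass over
-- runs of equal elements, tracking seen run values and seen run lengths in two sets (simpler/faster).

-- ===== PORT A =====
-- inner 'for j in range(i, len(indigredent))' loop: pivot x = indigredent[i], state bol
def recipeInner (x : Int) (bol : Bool) : List Int → Option String
  | [] => none
  | y :: ys =>
    if x == y && bol then recipeInner x bol ys
    else if bol == false && x == y then some "NO"
    else recipeInner x false ys

-- outer 'for i in range(len(indigredent))' loop: suffix starting at i
def recipeOuter : List Int → Option String
  | [] => none
  | x :: ys =>
    match recipeInner x true (x :: ys) with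
    | some s => some s
    | none => recipeOuter ys

def recipe (indigredent : List Int) : String :=
  match recipeOuter indigredent with
  | some s => s
  | none =>
    let lstCnt := (PySem.Dict.counter indigredent).items.map (·.2)
    if lstCnt.length ≠ (PySem.Set.ofList lstCnt).length then "NO" else "YES"

-- ===== PORT B =====
-- inner 'while j < n and indigredent[j] == x' loop: (number of leading copies of x, remainder)
def runSplit (x : Int) : List Int → Nat × List Int
  | [] => (0, [])
  | y :: ys =>
    if y == x then
      let r := runSplit x ys
      (r.1 + 1, r.2)
    else (0, y :: ys)

theorem runSplit_snd_length (x : Int) (l : List Int) : (runSplit x l).2.length ≤ l.length := by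
  induction l with
  | nil => simp [runSplit]
  | cons y ys ih =>
    simp only [runSplit]
    split
    · simp; omega
    · simp

-- outer 'while i < n' loop over the list, one run per step
def recipeGo (seen lens : PySem.Set Int) : List Int → String
  | [] => "YES"
  | x :: ys =>
    if PySem.Set.contains seen x then "NO"
    else
      let r := runSplit x ys
      if PySem.Set.contains lens ((r.1 : Int) + 1) then "NO"
      else recipeGo (PySem.Set.add seen x) (PySem.Set.add lens ((r.1 : Int) + 1)) r.2
termination_by l => l.length
decreasing_by
  have := runSplit_snd_length x ys
  simp
  omega

def recipe_alt (indigredent : List Int) : String :=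
  recipeGo PySem.Set.empty PySem.Set.empty indigredent

-- ===== PRECONDITION & SPEC =====
def Spec_recipe (indigredent : List Int) (out : String) : Prop := out = recipe_alt indigredent
instance (indigredent : List Int) (out : String) : Decidable (Spec_recipe indigredent out) := by unfold Spec_recipe; infer_instance

-- ===== CLAIM (what is proved, stated in full; the proofs are below) =====
def Claim_equal_recipe : Prop := ∀ (indigredent : List Int), Dom_recipe indigredent → Spec_recipe indigredent (recipe indigredent)

-- ===== LEMMAS AND PROOFS =====

def runLen (r : Int × Nat) : Int := r.2

-- run decomposition (proof-side mirror of recipeGo's steps)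
def runsF : List Int → List (Int × Nat)
  | [] => []
  | x :: ys => (x, (runSplit x ys).1 + 1) :: runsF (runSplit x ys).2
termination_by l => l.length
decreasing_by
  have := runSplit_snd_length x ys
  simp
  omega

theorem runSplit_eq (x : Int) (l : List Int) :
    runSplit x l = ((l.takeWhile (· == x)).length, l.dropWhile (· == x)) := by
  induction l with
  | nil => simp [runSplit]
  | cons y ys ih =>
    by_cases h : y = x <;>
      simp [runSplit, h, ih]

-- A's inner loop with bol already false: "NO" iff x occurs in the rest
theorem inner_false (x : Int) (l : List Int) :
    recipeInner x false l = if x ∈ l then some "NO" else none := by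
  induction l with
  | nil => simp [recipeInner]
  | cons y ys ih =>
    simp only [recipeInner, Bool.and_false, beq_self_eq_true, Bool.true_and]
    by_cases h : x = y <;> simp [h, ih]

-- A's inner loop with bol true first skips the leading run of x
theorem inner_true (x : Int) (l : List Int) :
    recipeInner x true l = recipeInner x false (l.dropWhile (· == x)) := by
  induction l with
  | nil => rfl
  | cons y ys ih =>
    by_cases h : x = y
    · subst h
      simp [recipeInner, ih]
    · have h' : ¬ (y = x) := fun hh => h hh.symm
      simp [recipeInner, h, h']

theorem outer_cons (x : Int) (ys : List Int) :
    recipeOuter (x :: ys) =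
      if x ∈ (runSplit x ys).2 then some "NO" else recipeOuter ys := by
  have h1 : recipeInner x true (x :: ys) = recipeInner x true ys := by
    simp [recipeInner]
  rw [recipeOuter, h1, inner_true, inner_false, runSplit_eq]
  by_cases h : x ∈ ys.dropWhile (· == x) <;> simp [h]

theorem dropWhile_all_append (x : Int) (t d : List Int) (ht : ∀ y ∈ t, y = x) :
    (t ++ d).dropWhile (· == x) = d.dropWhile (· == x) := by
  induction t with
  | nil => simp
  | cons y t ih =>
    have hy : y = x := ht y (by simp)
    simp only [List.cons_append, List.dropWhile_cons, hy, beq_self_eq_true, if_true]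
    exact ih (fun z hz => ht z (by simp [hz]))

-- skipping the rest of the leading run does not change A's outer loop verdict
theorem outer_run (x : Int) (t d : List Int) (ht : ∀ y ∈ t, y = x)
    (hd : d.dropWhile (· == x) = d) :
    recipeOuter (t ++ d) = if t ≠ [] ∧ x ∈ d then some "NO" else recipeOuter d := by
  induction t with
  | nil => simp
  | cons y t ih =>
    have hy : y = x := ht y (by simp)
    have ht' : ∀ z ∈ t, z = x := fun z hz => ht z (by simp [hz])
    subst hy
    rw [List.cons_append, outer_cons, runSplit_eq]
    rw [dropWhile_all_append y t d ht', hd]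
    rw [ih ht']
    by_cases hx : y ∈ d <;> simp [hx]

theorem mem_runsF (l : List Int) (v : Int) : v ∈ (runsF l).map Prod.fst ↔ v ∈ l := by
  induction l using runsF.induct with
  | case1 => simp [runsF]
  | case2 x ys ih =>
    have hsub : (runSplit x ys).2 ⊆ ys := by
      rw [runSplit_eq]; exact (List.dropWhile_sublist _).subset
    have ht : ∀ z ∈ ys.takeWhile (· == x), z = x := by
      intro z hz
      have := List.mem_takeWhile_imp hz
      simpa using this
    have hsplit : ys.takeWhile (· == x) ++ ys.dropWhile (· == x) = ys :=
      List.takeWhile_append_dropWhile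
    rw [runsF]
    simp only [List.map_cons, List.mem_cons, ih]
    constructor
    · rintro (rfl | h)
      · left; rfl
      · right; exact hsub h
    · rintro (rfl | h)
      · left; rfl
      · rw [← hsplit] at h
        rcases List.mem_append.mp h with h | h
        · left; exact ht v h
        · right; rw [runSplit_eq]; exact h

-- A's nested loops decide exactly distinctness of the run values
theorem outer_char (l : List Int) :
    recipeOuter l = if ((runsF l).map Prod.fst).Nodup then none else some "NO" := by
  induction l using runsF.induct with
  | case1 => simp [recipeOuter, runsF]
  | case2 x ys ih =>
    have ht : ∀ z ∈ ys.takeWhile (· == x), z = x := by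
      intro z hz
      have := List.mem_takeWhile_imp hz
      simpa using this
    have hd : (ys.dropWhile (· == x)).dropWhile (· == x) = ys.dropWhile (· == x) :=
      List.dropWhile_idempotent _ _
    have hsplit : ys.takeWhile (· == x) ++ ys.dropWhile (· == x) = ys :=
      List.takeWhile_append_dropWhile
    have h2 : recipeOuter ys =
        recipeOuter (ys.takeWhile (· == x) ++ ys.dropWhile (· == x)) := by rw [hsplit]
    rw [outer_cons, runSplit_eq, h2, outer_run x _ _ ht hd, runsF]
    rw [runSplit_eq] at ih
    simp only [runSplit_eq, List.map_cons, List.nodup_cons, mem_runsF, ih]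
    by_cases hx : x ∈ ys.dropWhile (· == x) <;>
      by_cases hn : ((runsF (ys.dropWhile (· == x))).map Prod.fst).Nodup <;>
        simp [hx, hn]

theorem foldl_add_of_mem (t : List Int) : ∀ (s : PySem.Set Int), (∀ y ∈ t, y ∈ s) →
    List.foldl PySem.Set.add s t = s := by
  induction t with
  | nil => intro s _; rfl
  | cons y t ih =>
    intro s h
    simp only [List.foldl_cons, PySem.Set.add_of_mem (h y (by simp))]
    exact ih s (fun z hz => h z (by simp [hz]))

theorem foldl_add_cons (d : List Int) : ∀ (s : PySem.Set Int) (x : Int), x ∉ d → x ∉ s →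
    List.foldl PySem.Set.add (x :: s) d = x :: List.foldl PySem.Set.add s d := by
  induction d with
  | nil => intro s x _ _; rfl
  | cons y d ih =>
    intro s x hxd hxs
    have hyx : y ≠ x := fun h => hxd (by simp [h.symm])
    have hmem : y ∈ (x :: s) ↔ y ∈ s := by simp [hyx]
    simp only [List.foldl_cons]
    by_cases hy : y ∈ s
    · rw [PySem.Set.add_of_mem (hmem.mpr hy), PySem.Set.add_of_mem hy]
      exact ih s x (fun h => hxd (by simp [h])) hxs
    · rw [PySem.Set.add_of_not_mem (fun h => hy (hmem.mp h)), PySem.Set.add_of_not_mem hy]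
      have : x :: s ++ [y] = x :: (s ++ [y]) := by simp
      rw [this]
      exact ih (s ++ [y]) x (fun h => hxd (by simp [h])) (by simp [hxs, hyx.symm])

theorem ofList_run (x : Int) (ys : List Int)
    (ht : ∀ z ∈ ys.takeWhile (· == x), z = x) (hx : x ∉ ys.dropWhile (· == x)) :
    PySem.Set.ofList (x :: ys) = x :: PySem.Set.ofList (ys.dropWhile (· == x)) := by
  rw [PySem.Set.ofList_eq_foldl, PySem.Set.ofList_eq_foldl]
  have h1 : List.foldl PySem.Set.add [] (x :: ys) = List.foldl PySem.Set.add [x] ys := by rfl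
  rw [h1]
  conv_lhs => rw [← List.takeWhile_append_dropWhile (p := (· == x)) (l := ys)]
  rw [List.foldl_append]
  rw [foldl_add_of_mem _ [x] (fun z hz => by simp [ht z hz])]
  exact foldl_add_cons _ [] x hx (by simp)

-- Counter values under contiguity are exactly the run lengths
theorem counter_char (l : List Int) (h : ((runsF l).map Prod.fst).Nodup) :
    (PySem.Set.ofList l).map (fun k => (l.count k : Int)) =
      (runsF l).map runLen := by
  induction l using runsF.induct with
  | case1 => simp [runsF]
  | case2 x ys ih =>
    have ht : ∀ z ∈ ys.takeWhile (· == x), z = x := by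
      intro z hz
      have := List.mem_takeWhile_imp hz
      simpa using this
    have hys : ys.takeWhile (· == x) ++ ys.dropWhile (· == x) = ys :=
      List.takeWhile_append_dropWhile
    have hsum : ∀ k : Int, ys.count k =
        (ys.takeWhile (· == x)).count k + (ys.dropWhile (· == x)).count k := by
      intro k
      conv_lhs => rw [← hys]
      rw [List.count_append]
    rw [runsF] at h ⊢
    simp only [List.map_cons, List.nodup_cons, mem_runsF, runSplit_eq] at h ⊢
    simp only [runSplit_eq] at ih
    obtain ⟨hx, hnd⟩ := h
    rw [ofList_run x ys ht hx]
    simp only [List.map_cons]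
    congr 1
    · -- head: count of x is the length of its run
      have hcx : (x :: ys).count x = (ys.takeWhile (· == x)).length + 1 := by
        have h1 : (ys.takeWhile (· == x)).count x = (ys.takeWhile (· == x)).length :=
          List.count_eq_length.mpr (fun b hb => (ht b hb).symm)
        have h2 : (ys.dropWhile (· == x)).count x = 0 := List.count_eq_zero.mpr hx
        have := hsum x
        simp only [List.count_cons, beq_self_eq_true, if_true]
        omega
      simp [runLen, hcx]
    · -- tail: counts restrict to the remainder
      rw [← ih hnd]
      apply List.map_congr_left
      intro k hk
      have hkd : k ∈ ys.dropWhile (· == x) := (PySem.Set.mem_ofList _ k).mp hk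
      have hkx : k ≠ x := fun h => hx (h ▸ hkd)
      have hc : (x :: ys).count k = (ys.dropWhile (· == x)).count k := by
        have h1 : (ys.takeWhile (· == x)).count k = 0 :=
          List.count_eq_zero.mpr (fun hkt => hkx (ht k hkt))
        have := hsum k
        have hxk : ¬ (x = k) := fun h => hkx h.symm
        simp only [List.count_cons, beq_iff_eq, hxk, if_false]
        omega
      rw [hc]

-- B's loop decides distinctness of run values and run lengths (accumulators generalized)
theorem go_char (l : List Int) : ∀ (seen lens : PySem.Set Int),
    recipeGo seen lens l =
      if (((runsF l).map Prod.fst).Nodup ∧ (∀ v ∈ (runsF l).map Prod.fst, v ∉ seen)) ∧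
         (((runsF l).map runLen).Nodup ∧
          (∀ k ∈ (runsF l).map runLen, k ∉ lens))
      then "YES" else "NO" := by
  induction l using runsF.induct with
  | case1 => intro seen lens; simp [recipeGo, runsF]
  | case2 x ys ih =>
    intro seen lens
    rw [recipeGo, runsF]
    simp only [List.map_cons, List.mem_cons, List.nodup_cons]
    by_cases hseen : x ∈ seen
    · rw [if_pos ((PySem.Set.contains_iff seen x).mpr hseen),
          if_neg (fun hcond => (hcond.1.2 x (List.mem_cons_self)) hseen)]
    · rw [if_neg (fun hc => hseen ((PySem.Set.contains_iff seen x).mp hc))]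
      by_cases hlen : ((runSplit x ys).1 : Int) + 1 ∈ lens
      · rw [if_pos ((PySem.Set.contains_iff lens _).mpr hlen),
            if_neg (fun hcond => (hcond.2.2 _ (List.mem_cons_self))
              (by simpa [runLen] using hlen))]
      · rw [if_neg (fun hc => hlen ((PySem.Set.contains_iff lens _).mp hc))]
        rw [ih]
        apply if_congr _ rfl rfl
        have hcast : runLen (x, (runSplit x ys).1 + 1) = ((runSplit x ys).1 : Int) + 1 := by
          simp [runLen]
        simp only [hcast, List.nodup_cons, List.forall_mem_cons, PySem.Set.mem_add, not_or]
        constructor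
        · rintro ⟨⟨h1, h2⟩, h3, h4⟩
          exact ⟨⟨⟨fun hx => (h2 x hx).2 rfl, h1⟩, hseen,
                  fun v hv => (h2 v hv).1⟩,
                ⟨fun hk => (h4 _ hk).2 rfl, h3⟩, hlen,
                  fun k hk => (h4 k hk).1⟩
        · rintro ⟨⟨⟨hx1, h1⟩, _, h2⟩, ⟨hx2, h3⟩, _, h4⟩
          exact ⟨⟨h1, fun v hv => ⟨h2 v hv, fun heq => hx1 (heq ▸ hv)⟩⟩,
                 h3, fun k hk => ⟨h4 k hk, fun heq => hx2 (heq ▸ hk)⟩⟩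

theorem ofList_sublist (l : List Int) (s : List Int) :
    (List.foldl PySem.Set.add s l).Sublist (s ++ l) := by
  induction l generalizing s with
  | nil => simp
  | cons y ys ih =>
    simp only [List.foldl_cons]
    refine (ih (PySem.Set.add s y)).trans ?_
    by_cases hy : y ∈ s
    · rw [PySem.Set.add_of_mem hy]
      exact (List.sublist_cons_self y ys).append_left s
    · rw [PySem.Set.add_of_not_mem hy]
      simp

theorem nodup_iff_len (l : List Int) :
    l.Nodup ↔ l.length = (PySem.Set.ofList l).length := by
  constructor
  · intro h
    rw [PySem.Set.ofList_eq_self_of_nodup l h]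
  · intro h
    have hs : (PySem.Set.ofList l).Sublist l := by
      rw [PySem.Set.ofList_eq_foldl]
      simpa using ofList_sublist l []
    have : PySem.Set.ofList l = l := (List.Sublist.length_eq hs).mp h.symm
    rw [← this]
    exact PySem.Set.nodup_ofList l

-- ===== VERDICT (by name: the statement is the Claim_ definition above) =====
theorem recipe_spec : Claim_equal_recipe := by
  intro a _
  unfold Spec_recipe recipe recipe_alt
  rw [outer_char, go_char]
  by_cases hn : ((runsF a).map Prod.fst).Nodup
  · rw [if_pos hn]
    have hv : ((PySem.Dict.counter a).items.map (·.2)) = (runsF a).map runLen := by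
      rw [PySem.Dict.items_counter, List.map_map]
      rw [← counter_char a hn]
      rfl
    simp only [hv]
    by_cases hl : ((runsF a).map runLen).Nodup
    · have hlen := (nodup_iff_len ((runsF a).map runLen)).mp hl
      rw [if_neg (by simp [hlen])]
      rw [if_pos]
      refine ⟨⟨hn, ?_⟩, hl, ?_⟩ <;> intro v hv' <;> simp [PySem.Set.empty]
    · rw [if_pos (fun heq => hl ((nodup_iff_len _).mpr heq))]
      rw [if_neg]
      intro hc
      exact hl hc.2.1
  · rw [if_neg hn]
    show "NO" = _
    rw [if_neg (fun hc => hn hc.1.1)]
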